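-- pv_equiv track=rewrite | github.com/abiolla/Python4everybody- | assignment_7_1.py | camelCaseSeparation
-- ===== SOURCE A (Python) =====
-- def camelCaseSeparation(words,variableName):
--     s=""
--     flag=0
--     for i in variableName:
--         if(flag==0):
--             s+=i.lower()
--             flag=1
--         elif(i.isupper()):
--             if s not in words:
--                 return "false"
--             else:
--                 s=""
--                 s+=i.lower()
--         else:
--             s+=i
--     if(s!=""):
--         if s not in words:
--             return "false"
--         s=""
--     return "true"
-- ===== SOURCE B (Python) =====
-- def camelCaseSeparation(words, variableName):
--     # Index/slice based: lowercase the whole name once, compute the boundary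
--     # indices (position 0 plus every uppercase position), then slice the
--     # lowered string between consecutive boundaries and check all slices.
--     low = variableName.lower()
--     bounds = [i for i, ch in enumerate(variableName) if i == 0 or ch.isupper()]
--     bounds.append(len(variableName))
--     segments = [low[a:b] for a, b in zip(bounds, bounds[1:])]
--     return "true" if all(seg in words for seg in segments) else "false"
-- ===== Notes on version B (the rewrite author's own statement) =====
-- stated objective: alternative
-- what changed: B replaces A's char-by-char segment accumulator with flag and inline membership checks by an index/slice algorithm: lowercase the whole name once, collect the boundary indices (position 0 and every uppercase position), slice the lowered name between consecutive boundaries, and check all slices for membership.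
import Mathlib
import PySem

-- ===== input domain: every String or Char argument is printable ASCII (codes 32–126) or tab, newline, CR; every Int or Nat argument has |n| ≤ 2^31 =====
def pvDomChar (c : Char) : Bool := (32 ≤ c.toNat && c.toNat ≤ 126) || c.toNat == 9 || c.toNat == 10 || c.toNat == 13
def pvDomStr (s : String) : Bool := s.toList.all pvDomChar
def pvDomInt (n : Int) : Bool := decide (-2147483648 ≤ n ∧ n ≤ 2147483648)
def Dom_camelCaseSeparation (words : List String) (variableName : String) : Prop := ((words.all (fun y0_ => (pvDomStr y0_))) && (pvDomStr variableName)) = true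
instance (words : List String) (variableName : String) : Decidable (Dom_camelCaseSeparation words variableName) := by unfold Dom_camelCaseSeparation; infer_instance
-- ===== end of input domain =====

-- B lowercases the whole name once, computes the boundary indices (0 and every uppercase position),
-- slices the lowered name between consecutive boundaries and checks all slices — instead of A's
-- char-by-char segment building with a flag and inline membership checks (objective: alternative).


-- ===== PORT A =====
-- A's loop: flag distinguishes the first character; s is the segment under construction;
-- on an uppercase char the current segment is checked inline ("false" returned early);
-- at the end a non-empty s is checked too.  Strings handled as List Char.
def camelCaseSeparationGoA (ws : List (List Char)) (flag : Nat) (s : List Char) : List Char → String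
  | [] => if s ≠ [] then (if ¬ ws.contains s then "false" else "true") else "true"
  | c :: rest =>
    if flag = 0 then
      camelCaseSeparationGoA ws 1 (s ++ [PySem.Chars.lowerChar c]) rest
    else if PySem.Chars.isupper c then
      if ¬ ws.contains s then "false"
      else camelCaseSeparationGoA ws flag ([] ++ [PySem.Chars.lowerChar c]) rest
    else
      camelCaseSeparationGoA ws flag (s ++ [c]) rest

def camelCaseSeparation (words : List String) (variableName : String) : String :=
  camelCaseSeparationGoA (words.map String.toList) 0 [] variableName.toList

-- ===== PORT B =====
-- B (see Source B): low = variableName.lower(); bounds = [i for i,ch in enumerate(variableName)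
-- if i == 0 or ch.isupper()] + [len(variableName)]; segments = [low[a:b] for a,b in
-- zip(bounds, bounds[1:])]; "true" iff all segments are in words.
def camelCaseSeparation_alt (words : List String) (variableName : String) : String :=
  let low := PySem.Chars.lower variableName.toList
  let bounds := (((PySem.List.enumerate variableName.toList).filter
      (fun p => p.1 == 0 || PySem.Chars.isupper p.2)).map Prod.fst)
      ++ [(variableName.toList.length : Int)]
  let segments := (bounds.zip bounds.tail).map (fun p => PySem.List.slice low (some p.1) (some p.2))
  let ws := words.map String.toList
  if segments.all (fun seg => ws.contains seg) then "true" else "false"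

-- ===== PRECONDITION & SPEC =====
def Spec_camelCaseSeparation (words : List String) (variableName : String) (out : String) : Prop := out = camelCaseSeparation_alt words variableName
instance (words : List String) (variableName : String) (out : String) : Decidable (Spec_camelCaseSeparation words variableName out) := by unfold Spec_camelCaseSeparation; infer_instance

-- ===== CLAIM (what is proved, stated in full; the proofs are below) =====
def Claim_equal_camelCaseSeparation : Prop := ∀ (words : List String) (variableName : String), Dom_camelCaseSeparation words variableName → Spec_camelCaseSeparation words variableName (camelCaseSeparation words variableName)

-- ===== LEMMAS AND PROOFS =====

-- The segment chars other than the first are never uppercase.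
def pvNotU (c : Char) : Bool := !(PySem.Chars.isupper c)

-- Positions of the uppercase characters.
def pvUpIdx : List Char → List Nat
  | [] => []
  | c :: cs => if PySem.Chars.isupper c then 0 :: (pvUpIdx cs).map (· + 1) else (pvUpIdx cs).map (· + 1)

-- Reference splitter: each segment is the lowercased head char followed by the run of
-- non-uppercase chars; both ports' segment lists are reduced to this.
def pvSplit : List Char → List (List Char)
  | [] => []
  | c :: cs => (PySem.Chars.lowerChar c :: cs.takeWhile pvNotU) :: pvSplit (cs.dropWhile pvNotU)
termination_by cs => cs.length
decreasing_by
  have := List.length_dropWhile_le pvNotU cs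
  simp; omega

-- Nat-index version of B's slicing phase.
def pvPairsSeg (low : List Char) (bs : List Nat) : List (List Char) :=
  (bs.zip bs.tail).map (fun p => (low.drop p.1).take (p.2 - p.1))

theorem pvLowerChar_of_not_upper (c : Char) (h : PySem.Chars.isupper c = false) :
    PySem.Chars.lowerChar c = c := by
  simp [PySem.Chars.lowerChar, h]

-- A's inline checking loop (flag = 1, current segment cur) decides "all segments in ws".
theorem pvGoA_eq (ws : List (List Char)) (cs : List Char) :
    ∀ cur : List Char, cur ≠ [] →
      camelCaseSeparationGoA ws 1 cur cs =
        (if (((cur ++ cs.takeWhile pvNotU) :: pvSplit (cs.dropWhile pvNotU)).all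
              (fun seg => ws.contains seg)) then "true" else "false") := by
  induction cs with
  | nil =>
    intro cur hcur
    simp [camelCaseSeparationGoA, pvSplit, hcur]
  | cons c rest ih =>
    intro cur hcur
    by_cases hu : PySem.Chars.isupper c = true
    · simp only [camelCaseSeparationGoA, hu, if_true,
        List.takeWhile_cons, List.dropWhile_cons, pvNotU, Bool.not_true]
      by_cases hm : cur ∈ ws <;>
        simp [hm, pvSplit, ih [PySem.Chars.lowerChar c] (by simp)]
    · simp only [Bool.not_eq_true] at hu
      simp [camelCaseSeparationGoA, hu, pvNotU, ih (cur ++ [c]) (by simp)]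

-- Shifting every bound by the length of a prefix drops that prefix from every slice.
theorem pvPairsSeg_shift (pre low : List Char) (bs : List Nat) :
    pvPairsSeg (pre ++ low) (bs.map (· + pre.length)) = pvPairsSeg low bs := by
  unfold pvPairsSeg
  rw [← List.map_tail, List.zip_map, List.map_map]
  apply List.map_congr_left
  intro p _
  have h1 : (pre ++ low).drop (p.1 + pre.length) = low.drop p.1 := by
    rw [List.drop_append, List.drop_eq_nil_of_le (by omega),
      show p.1 + pre.length - pre.length = p.1 by omega]
    simp
  have h2 : p.2 + pre.length - (p.1 + pre.length) = p.2 - p.1 := by omega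
  simp [Prod.map, h1, h2]

-- Unfolding pvPairsSeg over the first two bounds.
theorem pvPairsSeg_cons₂ (low : List Char) (a b : Nat) (bs : List Nat) :
    pvPairsSeg low (a :: b :: bs) = (low.drop a).take (b - a) :: pvPairsSeg low (b :: bs) := by
  simp [pvPairsSeg]

-- Core: B's slicing of the lowered string at 0 :: shifted uppercase positions ++ [length]
-- produces exactly the reference segments, with cur the (already lowered) open segment.
theorem pvPairsSeg_eq_split (rest : List Char) :
    ∀ cur : List Char,
      pvPairsSeg (cur ++ PySem.Chars.lower rest)
          (0 :: ((pvUpIdx rest).map (· + cur.length) ++ [cur.length + rest.length]))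
        = (cur ++ rest.takeWhile pvNotU) :: pvSplit (rest.dropWhile pvNotU) := by
  induction rest with
  | nil =>
    intro cur
    simp [pvUpIdx, pvSplit, pvPairsSeg, PySem.Chars.lower]
  | cons d r ih =>
    intro cur
    have hlow : PySem.Chars.lower (d :: r) = PySem.Chars.lowerChar d :: PySem.Chars.lower r := by
      simp [PySem.Chars.lower]
    by_cases hu : PySem.Chars.isupper d = true
    · have e1 : (pvUpIdx (d :: r)).map (· + cur.length) ++ [cur.length + (d :: r).length]
          = (0 :: ((pvUpIdx r).map (· + 1) ++ [1 + r.length])).map (· + cur.length) := by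
        simp only [pvUpIdx, hu, if_true, List.map_cons, List.map_append, List.map_map,
          List.length_cons, List.cons_append]
        congr 1
        congr 1
        simp
        omega
      rw [hlow, e1, List.map_cons, pvPairsSeg_cons₂]
      have e4 := pvPairsSeg_shift cur (PySem.Chars.lowerChar d :: PySem.Chars.lower r)
          (0 :: ((pvUpIdx r).map (· + 1) ++ [1 + r.length]))
      have ih' := ih [PySem.Chars.lowerChar d]
      simp only [List.map_cons, List.map_append, Nat.zero_add, List.length_cons,
        List.length_nil, List.singleton_append] at e4 ih' ⊢
      rw [e4, ih']
      simp [pvSplit, pvNotU, hu]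
    · simp only [Bool.not_eq_true] at hu
      have e1 : (pvUpIdx (d :: r)).map (· + cur.length) ++ [cur.length + (d :: r).length]
          = (pvUpIdx r).map (· + (cur ++ [d]).length) ++ [(cur ++ [d]).length + r.length] := by
        simp only [pvUpIdx, hu, Bool.false_eq_true, if_false, List.map_map, List.length_append,
          List.length_cons, List.length_nil]
        congr 1
        · apply List.map_congr_left; intro k _; simp; omega
        · congr 1; omega
      rw [hlow, pvLowerChar_of_not_upper d hu,
          show cur ++ d :: PySem.Chars.lower r = (cur ++ [d]) ++ PySem.Chars.lower r from by simp,
          e1, ih (cur ++ [d])]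
      simp [pvNotU, hu]

-- B's Int bounds are the casts of the Nat bounds.
theorem pvBounds_cast (xs : List Char) (s : Nat) (hs : 1 ≤ s) :
    ((PySem.List.enumerate xs ((s : Nat) : Int)).filter
        (fun p => p.1 == 0 || PySem.Chars.isupper p.2)).map Prod.fst
      = (pvUpIdx xs).map (fun k => ((k + s : Nat) : Int)) := by
  induction xs generalizing s with
  | nil => simp [PySem.List.enumerate_nil, pvUpIdx]
  | cons c rest ih =>
    have hz : (((s : Nat) : Int) == 0) = false := by
      simp only [beq_eq_false_iff_ne, ne_eq]
      omega
    have hcast : ((s : Nat) : Int) + 1 = (((s + 1 : Nat)) : Int) := by push_cast; ring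
    have ht := ih (s + 1) (by omega)
    by_cases hu : PySem.Chars.isupper c = true
    · simp only [PySem.List.enumerate_cons, List.filter_cons, hz, hu, Bool.false_or,
        if_true, List.map_cons, pvUpIdx, hcast, ht, List.map_map]
      congr 1
      · push_cast; ring
      · apply List.map_congr_left; intro k _; simp only [Function.comp_apply]; push_cast; ring
    · simp only [Bool.not_eq_true] at hu
      simp only [PySem.List.enumerate_cons, List.filter_cons, hz, hu, Bool.false_or,
        Bool.false_eq_true, if_false, pvUpIdx, hcast, ht, List.map_map]
      apply List.map_congr_left; intro k _; simp only [Function.comp_apply]; push_cast; ring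

-- Slicing with cast bounds is Nat drop/take slicing.
theorem pvSliceCast (low : List Char) (bs : List Nat) :
    (((bs.map (Nat.cast : Nat → Int)).zip ((bs.map (Nat.cast : Nat → Int)).tail)).map
        (fun p => PySem.List.slice low (some p.1) (some p.2)))
      = pvPairsSeg low bs := by
  unfold pvPairsSeg
  rw [← List.map_tail, List.zip_map, List.map_map]
  apply List.map_congr_left
  intro p _
  simp [PySem.List.slice_natCast]

-- ===== VERDICT (by name: the statement is the Claim_ definition above) =====
theorem camelCaseSeparation_spec : Claim_equal_camelCaseSeparation := by
  intro words variableName _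
  unfold Spec_camelCaseSeparation camelCaseSeparation camelCaseSeparation_alt
  cases h : variableName.toList with
  | nil => simp [camelCaseSeparationGoA, PySem.List.enumerate_nil]
  | cons c rest =>
    have hgo := pvGoA_eq (words.map String.toList) rest [PySem.Chars.lowerChar c] (by simp)
    have hb : ((PySem.List.enumerate (c :: rest)).filter
          (fun p => p.1 == 0 || PySem.Chars.isupper p.2)).map Prod.fst ++ [((c :: rest).length : Int)]
        = (0 :: ((pvUpIdx rest).map (· + 1) ++ [1 + rest.length])).map (Nat.cast : Nat → Int) := by
      have ht := pvBounds_cast rest 1 (by omega)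
      norm_num at ht
      rw [show PySem.List.enumerate (c :: rest) = PySem.List.enumerate (c :: rest) 0 from rfl,
        PySem.List.enumerate_cons]
      norm_num [ht]
      omega
    have hsc := pvSliceCast (PySem.Chars.lower (c :: rest))
        (0 :: ((pvUpIdx rest).map (· + 1) ++ [1 + rest.length]))
    have hsplit := pvPairsSeg_eq_split rest [PySem.Chars.lowerChar c]
    have hlow : PySem.Chars.lower (c :: rest)
        = [PySem.Chars.lowerChar c] ++ PySem.Chars.lower rest := by
      simp [PySem.Chars.lower]
    simp only [List.length_cons, List.length_nil, Nat.zero_add, List.singleton_append] at hsplit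
    rw [hlow] at hsc
    simp only [List.singleton_append] at hsc
    rw [show camelCaseSeparationGoA (words.map String.toList) 0 [] (c :: rest)
        = camelCaseSeparationGoA (words.map String.toList) 1 [PySem.Chars.lowerChar c] rest from rfl,
      hgo]
    simp only [hb, hlow, hsc, hsplit, List.singleton_append]
    rfl
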